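-- pv_equiv track=rewrite | github.com/jo15122002/flair | src/diff_extractor.py | filter_diff
-- ===== SOURCE A (Python) =====
-- def filter_diff(diff, exclude_patterns=None):
--     def filter_diff(diff, exclude_patterns=None):
--         """
--         Filtre le diff pour exclure les fichiers dont le chemin contient un motif
--         indésirable.
--         Si aucun pattern n'est fourni, on utilise une liste par défaut.
--         """
--     if exclude_patterns is None:
--         exclude_patterns = ['test', 'tests', 'spec']
--
--     filtered_lines = []
--     skip_file = False
--     for line in diff.splitlines():
--         # Détecte le début d'un bloc de fichier
--         if line.startswith("diff --git"):
--             # Exemple de ligne : "diff --git a/src/main.py b/src/main.py"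
--             parts = line.split()
--             if len(parts) >= 3:
--                 file_a = parts[2]  # attend "a/chemin/du/fichier"
--                 filename = file_a[2:] if file_a.startswith("a/") else file_a
--                 # Vérifie si le nom de fichier contient un des motifs d'exclusion
--                 skip_file = any(pat.strip().lower() in filename.lower() for pat in exclude_patterns)
--             filtered_lines.append(line)
--         else:
--             if not skip_file:
--                 filtered_lines.append(line)
--     return "\n".join(filtered_lines)
-- ===== SOURCE B (Python) =====
-- def filter_diff(diff, exclude_patterns=None):
--     if exclude_patterns is None:
--         exclude_patterns = ['test', 'tests', 'spec']
--     pats = [p.strip().lower() for p in exclude_patterns]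
--     lines = diff.splitlines()
--     n = len(lines)
--     out = []
--     pos = 0
--     # initial segment (before the first header) is always kept
--     while pos < n and not lines[pos].startswith("diff --git"):
--         pos += 1
--     out.extend(lines[:pos])
--     skip = False
--     while pos < n:
--         header = lines[pos]
--         pos += 1
--         start = pos
--         while pos < n and not lines[pos].startswith("diff --git"):
--             pos += 1
--         parts = header.split()
--         if len(parts) >= 3:
--             name = parts[2]
--             if name.startswith("a/"):
--                 name = name[2:]
--             skip = any(p in name.lower() for p in pats)
--         out.append(header)
--         if not skip:
--             out.extend(lines[start:pos])
--     return "\n".join(out)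
-- ===== Notes on version B (the rewrite author's own statement) =====
-- stated objective: alternative
-- what changed: Replaced A's single per-line loop threading a skip flag through every line with a segment-based two-pointer scan: the diff is walked span by span (preamble, then header + body span per file), patterns are strip/lower-normalized once up front, and whole kept spans are appended by slice.
import Mathlib
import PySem

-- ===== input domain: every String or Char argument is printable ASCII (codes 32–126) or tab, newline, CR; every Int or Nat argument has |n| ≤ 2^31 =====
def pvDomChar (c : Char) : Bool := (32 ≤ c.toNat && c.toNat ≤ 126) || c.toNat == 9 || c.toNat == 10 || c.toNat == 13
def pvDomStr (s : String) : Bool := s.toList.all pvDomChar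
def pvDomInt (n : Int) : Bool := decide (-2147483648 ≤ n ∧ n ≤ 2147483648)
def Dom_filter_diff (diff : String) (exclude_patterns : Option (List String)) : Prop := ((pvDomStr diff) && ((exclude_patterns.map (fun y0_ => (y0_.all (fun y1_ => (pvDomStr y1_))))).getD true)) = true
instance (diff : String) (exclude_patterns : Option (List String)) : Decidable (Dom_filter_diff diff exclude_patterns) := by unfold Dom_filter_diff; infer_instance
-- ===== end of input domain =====

-- B re-decomposes A's per-line skip-flag loop into a segment (span) scan with the
-- exclusion patterns normalized once; same output, alternative structure.

-- ===== PORT A =====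
-- per-line fold carrying (collected lines, skip flag), as in A's single for-loop
def pvAStep (exclude_patterns : List String) (st : List String × Bool) (line : String) :
    List String × Bool :=
  if PySem.Str.startswith line "diff --git" then
    let parts := PySem.Str.split₀ line
    let skip_file :=
      if 3 ≤ parts.length then
        let file_a := parts.getD 2 ""   -- parts[2], in range by the guard
        let filename := if PySem.Str.startswith file_a "a/" then PySem.Str.slice file_a (some 2) none else file_a
        exclude_patterns.any (fun pat =>
          PySem.Str.isIn (PySem.Str.lower (PySem.Str.strip pat)) (PySem.Str.lower filename))
      else st.2
    (st.1 ++ [line], skip_file)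
  else
    if st.2 then st else (st.1 ++ [line], st.2)

def filter_diff (diff : String) (exclude_patterns : Option (List String)) : String :=
  let ep := exclude_patterns.getD ["test", "tests", "spec"]
  PySem.Str.join "\n" (((PySem.Str.splitlines diff).foldl (pvAStep ep) ([], false)).1)

-- ===== PORT B =====
def pvIsHeader (line : String) : Bool := PySem.Str.startswith line "diff --git"

-- exclusion decision from a header line, keeping prev on a <3-token header
def pvExSkip (pats : List String) (header : String) (prev : Bool) : Bool :=
  let parts := PySem.Str.split₀ header
  if 3 ≤ parts.length then
    let name := parts.getD 2 ""
    let name := if PySem.Str.startswith name "a/" then PySem.Str.slice name (some 2) none else name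
    pats.any (fun p => PySem.Str.isIn p (PySem.Str.lower name))
  else prev

-- the outer while-loop: one step per file segment (header + its body span)
def pvBGo (pats : List String) (lines : List String) (skip : Bool) : List String :=
  match lines with
  | [] => []
  | header :: rest =>
      let body := rest.takeWhile (fun l => !pvIsHeader l)
      let rest' := rest.dropWhile (fun l => !pvIsHeader l)
      let skip' := pvExSkip pats header skip
      header :: ((if skip' then [] else body) ++ pvBGo pats rest' skip')
termination_by lines.length
decreasing_by
  simp only [List.length_cons]
  exact Nat.lt_succ_of_le (List.length_dropWhile_le _ _)

def filter_diff_alt (diff : String) (exclude_patterns : Option (List String)) : String :=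
  let pats := (exclude_patterns.getD ["test", "tests", "spec"]).map
    (fun p => PySem.Str.lower (PySem.Str.strip p))
  let lines := PySem.Str.splitlines diff
  let pre := lines.takeWhile (fun l => !pvIsHeader l)
  let rest := lines.dropWhile (fun l => !pvIsHeader l)
  PySem.Str.join "\n" (pre ++ pvBGo pats rest false)

-- ===== PRECONDITION & SPEC =====
def Spec_filter_diff (diff : String) (exclude_patterns : Option (List String)) (out : String) : Prop := out = filter_diff_alt diff exclude_patterns
instance (diff : String) (exclude_patterns : Option (List String)) (out : String) : Decidable (Spec_filter_diff diff exclude_patterns out) := by unfold Spec_filter_diff; infer_instance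

-- ===== CLAIM (what is proved, stated in full; the proofs are below) =====
def Claim_equal_filter_diff : Prop := ∀ (diff : String) (exclude_patterns : Option (List String)), Dom_filter_diff diff exclude_patterns → Spec_filter_diff diff exclude_patterns (filter_diff diff exclude_patterns)

-- ===== LEMMAS AND PROOFS =====

-- the skip decision computed inline by A equals B's over pre-normalized patterns
theorem pvExSkip_eq (ep : List String) (header : String) (prev : Bool)
    (h : pvIsHeader header = true) :
    (pvAStep ep (acc, prev) header).2
      = pvExSkip (ep.map (fun p => PySem.Str.lower (PySem.Str.strip p))) header prev := by
  simp only [pvAStep, pvIsHeader] at *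
  rw [if_pos h]
  simp [pvExSkip, List.any_map, Function.comp_def]

theorem pvAStep_header (ep : List String) (acc : List String) (prev : Bool) (header : String)
    (h : pvIsHeader header = true) :
    pvAStep ep (acc, prev) header
      = (acc ++ [header],
         pvExSkip (ep.map (fun p => PySem.Str.lower (PySem.Str.strip p))) header prev) := by
  have h2 := pvExSkip_eq (acc := acc) ep header prev h
  simp only [pvAStep, pvIsHeader] at *
  rw [if_pos h] at *
  simp_all

-- the accumulator only grows by appending: shift it out of the fold
theorem pvFold_shift (ep : List String) (xs : List String) (acc : List String) (sk : Bool) :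
    xs.foldl (pvAStep ep) (acc, sk)
      = (acc ++ (xs.foldl (pvAStep ep) ([], sk)).1, (xs.foldl (pvAStep ep) ([], sk)).2) := by
  induction xs generalizing acc sk with
  | nil => simp
  | cons x xs ih =>
      simp only [List.foldl_cons]
      rw [ih, ih ((pvAStep ep ([], sk) x).1)]
      have : pvAStep ep (acc, sk) x
          = (acc ++ (pvAStep ep ([], sk) x).1, (pvAStep ep ([], sk) x).2) := by
        simp only [pvAStep]
        split_ifs <;> simp_all
      rw [this]
      simp

-- a span of non-header lines: appended iff not skipping, flag unchanged
theorem pvFold_body (ep : List String) (body : List String) (acc : List String) (sk : Bool)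
    (h : ∀ l ∈ body, pvIsHeader l = false) :
    body.foldl (pvAStep ep) (acc, sk) = (acc ++ (if sk then [] else body), sk) := by
  induction body generalizing acc with
  | nil => simp
  | cons x xs ih =>
      have hx : pvIsHeader x = false := h x (by simp)
      simp only [List.foldl_cons]
      have hstep : pvAStep ep (acc, sk) x = (if sk then acc else acc ++ [x], sk) := by
        simp only [pvIsHeader] at hx
        simp only [pvAStep]
        rw [if_neg (by simp only [hx]; exact Bool.false_ne_true)]
        split_ifs <;> simp_all
      rw [hstep]
      have hxs : ∀ l ∈ xs, pvIsHeader l = false := fun l hl => h l (List.mem_cons_of_mem _ hl)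
      cases sk <;> simp [ih _ hxs]

-- the first element left by dropWhile fails the (negated) predicate
theorem pvDropWhile_head (l : List String) (x : String) (xs : List String)
    (hd : List.dropWhile (fun l => !pvIsHeader l) l = x :: xs) : pvIsHeader x = true := by
  induction l with
  | nil => simp at hd
  | cons a as ih =>
      rw [List.dropWhile_cons] at hd
      split_ifs at hd with ha
      · exact ih hd
      · cases hd; simpa using ha

-- main invariant: A's fold from an empty accumulator is B's segment scan
theorem pvMain (ep : List String) :
    ∀ (n : Nat) (lines : List String), lines.length ≤ n → ∀ (sk : Bool),
    (lines.foldl (pvAStep ep) ([], sk)).1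
      = (if sk then [] else lines.takeWhile (fun l => !pvIsHeader l))
        ++ pvBGo (ep.map (fun p => PySem.Str.lower (PySem.Str.strip p)))
            (lines.dropWhile (fun l => !pvIsHeader l)) sk := by
  intro n
  induction n with
  | zero =>
      intro lines hlen sk
      have : lines = [] := List.eq_nil_of_length_eq_zero (Nat.le_zero.mp hlen)
      subst this; simp [pvBGo]
  | succ n ih =>
      intro lines hlen sk
      set pre := lines.takeWhile (fun l => !pvIsHeader l) with hpre
      set rest := lines.dropWhile (fun l => !pvIsHeader l) with hrest
      have hsplit : lines = pre ++ rest := (List.takeWhile_append_dropWhile).symm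
      have hpreall : ∀ l ∈ pre, pvIsHeader l = false := by
        intro l hl
        have := List.mem_takeWhile_imp (hpre ▸ hl)
        simpa using this
      rw [hsplit, List.foldl_append, pvFold_body ep pre [] sk hpreall]
      cases hr : rest with
      | nil => simp [pvBGo]
      | cons header tail =>
          have hhead : pvIsHeader header = true :=
            pvDropWhile_head lines header tail (by rw [← hrest, hr])
          have htail : tail.length ≤ n := by
            have h1 : rest.length ≤ lines.length := by
              rw [hrest]; exact List.length_dropWhile_le _ _
            rw [hr] at h1
            simp only [List.length_cons] at h1
            omega
          simp only [List.foldl_cons]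
          rw [pvAStep_header ep _ sk header hhead]
          set sk' := pvExSkip (ep.map (fun p => PySem.Str.lower (PySem.Str.strip p))) header sk with hsk'
          rw [pvFold_shift ep tail _ sk', ih tail htail sk']
          conv_rhs => rw [pvBGo]
          simp only []
          rw [← hsk']
          cases sk <;> simp

-- ===== VERDICT (by name: the statement is the Claim_ definition above) =====
theorem filter_diff_spec : Claim_equal_filter_diff := by
  intro diff ep _
  unfold Spec_filter_diff filter_diff filter_diff_alt
  have := pvMain (ep.getD ["test", "tests", "spec"]) (PySem.Str.splitlines diff).length
    (PySem.Str.splitlines diff) le_rfl false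
  simp only [if_neg (by simp : ¬(false = true))] at this
  simp [this]
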